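-- pv_equiv track=rewrite | github.com/lakshitsachdeva/WideQuant | src/data/finquant_loader.py | _lexical_rank_fallback
-- ===== SOURCE A (Python) =====
-- def _lexical_rank_fallback(query_tokens: list[str], doc_tokens: list[list[str]]) -> list[int]:
--     """Rank documents by lexical overlap if BM25 is unavailable."""
--     query_set = set(query_tokens)
--     scored = []
--     for idx, tokens in enumerate(doc_tokens):
--         score = len(query_set.intersection(tokens))
--         scored.append((score, idx))
--     scored.sort(key=lambda item: item[0], reverse=True)
--     return [idx for _, idx in scored]
-- ===== SOURCE B (Python) =====
-- def _lexical_rank_fallback(query_tokens: list[str], doc_tokens: list[list[str]]) -> list[int]: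
--     """Rank documents by lexical overlap via an inverted index (token -> posting list)."""
--     index = {}
--     for i, tokens in enumerate(doc_tokens):
--         for t in set(tokens):
--             index.setdefault(t, []).append(i)
--     scores = [0] * len(doc_tokens)
--     for t in set(query_tokens):
--         for i in index.get(t, []):
--             scores[i] += 1
--     return sorted(range(len(doc_tokens)), key=lambda i: -scores[i])
-- ===== Notes on version B (the rewrite author's own statement) =====
-- stated objective: alternative
-- what changed: Replaces A's per-document set-intersection scoring pass with an inverted index (token -> posting list of document indices) whose postings increment a score array, and ranks by a stable ascending sort of the indices keyed by negated score instead of a reverse sort of (score, idx) pairs.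
import Mathlib
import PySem

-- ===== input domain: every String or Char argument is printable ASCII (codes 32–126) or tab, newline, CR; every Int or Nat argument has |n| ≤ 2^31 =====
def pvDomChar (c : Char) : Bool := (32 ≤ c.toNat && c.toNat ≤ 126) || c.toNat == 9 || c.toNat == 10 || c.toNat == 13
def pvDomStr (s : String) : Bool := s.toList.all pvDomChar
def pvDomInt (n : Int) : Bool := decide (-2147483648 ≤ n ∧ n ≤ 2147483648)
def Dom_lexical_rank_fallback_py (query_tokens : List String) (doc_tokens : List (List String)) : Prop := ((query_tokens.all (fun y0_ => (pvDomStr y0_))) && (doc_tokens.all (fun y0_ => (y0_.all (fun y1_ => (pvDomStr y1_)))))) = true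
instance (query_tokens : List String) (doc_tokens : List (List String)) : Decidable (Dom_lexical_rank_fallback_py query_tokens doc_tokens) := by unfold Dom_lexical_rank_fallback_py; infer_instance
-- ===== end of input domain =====

-- B replaces A's per-document set intersections by an inverted index (token → posting list of
-- document indices) and a stable ascending sort of the indices keyed by negated score; same
-- return value, a different data structure (objective: alternative).

-- ===== PORT A =====
def lexical_rank_fallback_py (query_tokens : List String) (doc_tokens : List (List String)) : List Int :=
  let query_set : PySem.Set String := PySem.Set.ofList query_tokens
  let scored : List (Int × Int) :=
    (PySem.List.enumerate doc_tokens).foldl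
      (fun acc p => acc ++ [(PySem.Set.len (PySem.Set.inter query_set p.2), p.1)]) []
  (PySem.List.sorted scored (fun item => item.1) true).map (fun p => p.2)

-- ===== PORT B =====
def lexical_rank_fallback_py_alt (query_tokens : List String) (doc_tokens : List (List String)) : List Int :=
  let index : PySem.Dict String (List Int) :=
    (PySem.List.enumerate doc_tokens).foldl
      (fun d p => (PySem.Set.ofList p.2).foldl
        (fun d t => PySem.Dict.insert d t (PySem.Dict.getD d t [] ++ [p.1])) d)
      PySem.Dict.empty
  let scores : List Int :=
    (PySem.Set.ofList query_tokens).foldl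
      (fun sc t => (PySem.Dict.getD index t []).foldl
        (fun sc i => PySem.List.pySetD sc i (PySem.List.pyGetD sc i 0 + 1)) sc)
      (List.replicate doc_tokens.length 0)
  PySem.List.sorted (PySem.List.pyRange 0 (PySem.List.len doc_tokens))
    (fun i => -(PySem.List.pyGetD scores i 0)) false

-- ===== PRECONDITION & SPEC =====
def Spec_lexical_rank_fallback_py (query_tokens : List String) (doc_tokens : List (List String)) (out : List Int) : Prop := out = lexical_rank_fallback_py_alt query_tokens doc_tokens
instance (query_tokens : List String) (doc_tokens : List (List String)) (out : List Int) : Decidable (Spec_lexical_rank_fallback_py query_tokens doc_tokens out) := by unfold Spec_lexical_rank_fallback_py; infer_instance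

-- ===== CLAIM (what is proved, stated in full; the proofs are below) =====
def Claim_equal_lexical_rank_fallback_py : Prop := ∀ (query_tokens : List String) (doc_tokens : List (List String)), Dom_lexical_rank_fallback_py query_tokens doc_tokens → Spec_lexical_rank_fallback_py query_tokens doc_tokens (lexical_rank_fallback_py query_tokens doc_tokens)

-- ===== LEMMAS AND PROOFS =====

-- score of one document, as A computes it
def pvScore (q : List String) (toks : List String) : Int :=
  PySem.Set.len (PySem.Set.inter (PySem.Set.ofList q) toks)

-- the posting list of a token, as B's index stores it
def pvPostings (dt : List (List String)) (t : String) : List Int :=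
  (PySem.List.pyRange 0 (PySem.List.len dt)).filter
    (fun j => decide (t ∈ PySem.List.pyGetD dt j []))

lemma foldl_append_map {α β : Type} (f : α → β) (xs : List α) (init : List β) :
    xs.foldl (fun acc x => acc ++ [f x]) init = init ++ xs.map f := by
  induction xs generalizing init with
  | nil => simp
  | cons x xs ih => simp [ih]

lemma flatMap_ite_filter {α : Type} (P : α → Prop) [DecidablePred P] (xs : List α) :
    xs.flatMap (fun x => if P x then [x] else []) = xs.filter (fun x => decide (P x)) := by
  induction xs with
  | nil => rfl
  | cons x xs ih => by_cases h : P x <;> simp [h, ih]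

lemma insertBy_map {α β : Type} (f : α → β) (p : β → β → Bool) (q : α → α → Bool)
    (h : ∀ a b, p (f a) (f b) = q a b) (x : α) (ys : List α) :
    (PySem.List.insertBy q x ys).map f = PySem.List.insertBy p (f x) (ys.map f) := by
  induction ys with
  | nil => simp [PySem.List.insertBy]
  | cons y ys ih =>
      simp only [PySem.List.insertBy, List.map_cons, h]
      by_cases hq : q x y <;> simp [hq, ih]

lemma foldl_insertBy_map {α β : Type} (f : α → β) (p : β → β → Bool) (q : α → α → Bool)
    (h : ∀ a b, p (f a) (f b) = q a b) (xs : List α) (init : List α) :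
    (xs.foldl (fun acc x => PySem.List.insertBy q x acc) init).map f
      = (xs.map f).foldl (fun acc y => PySem.List.insertBy p y acc) (init.map f) := by
  induction xs generalizing init with
  | nil => rfl
  | cons x xs ih => simp only [List.foldl_cons, List.map_cons, ih, insertBy_map f p q h]

lemma getD_foldl_insert_append (i : Int) (t : String) (L : List String) (hL : L.Nodup) :
    ∀ (d : PySem.Dict String (List Int)),
    PySem.Dict.getD (L.foldl (fun d u => PySem.Dict.insert d u (PySem.Dict.getD d u [] ++ [i])) d) t []
      = PySem.Dict.getD d t [] ++ (if t ∈ L then [i] else []) := by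
  induction L with
  | nil => intro d; simp
  | cons u L ih =>
      intro d
      simp only [List.foldl_cons]
      rw [ih (List.Nodup.of_cons hL), PySem.Dict.getD_insert]
      by_cases htu : t = u
      · subst htu
        have : t ∉ L := (List.nodup_cons.mp hL).1
        simp [this]
      · simp [htu]

lemma getD_buildIndex (t : String) :
    ∀ (ds : List (List String)) (s : Int) (d : PySem.Dict String (List Int)),
    PySem.Dict.getD ((PySem.List.enumerate ds s).foldl
        (fun d p => (PySem.Set.ofList p.2).foldl
          (fun d u => PySem.Dict.insert d u (PySem.Dict.getD d u [] ++ [p.1])) d) d) t []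
      = PySem.Dict.getD d t []
        ++ (PySem.List.enumerate ds s).flatMap (fun p => if t ∈ p.2 then [p.1] else []) := by
  intro ds
  induction ds with
  | nil => intro s d; simp [PySem.List.enumerate]
  | cons x ds ih =>
      intro s d
      simp only [PySem.List.enumerate, List.foldl_cons, List.flatMap_cons]
      rw [ih]
      rw [getD_foldl_insert_append s t _ (PySem.Set.nodup_ofList x)]
      have : (if t ∈ PySem.Set.ofList x then [s] else []) = (if t ∈ x then [s] else []) := by
        by_cases h : t ∈ x <;> simp [PySem.Set.mem_ofList, h]
      rw [this, List.append_assoc]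

lemma count_postings (dt : List (List String)) (t : String) (k : Nat) :
    List.count (k : Int) (pvPostings dt t)
      = if t ∈ PySem.List.pyGetD dt (k : Int) [] then 1 else 0 := by
  have hnd : (pvPostings dt t).Nodup :=
    List.Nodup.filter _ (PySem.List.nodup_pyRange_one 0 (PySem.List.len dt))
  by_cases hmem : (k : Int) ∈ pvPostings dt t
  · have h1 : List.count (k : Int) (pvPostings dt t) = 1 :=
      List.count_eq_one_of_mem hnd hmem
    have ht := (List.mem_filter.mp hmem).2
    simp only [decide_eq_true_eq] at ht
    rw [h1, if_pos ht]
  · have h0 : List.count (k : Int) (pvPostings dt t) = 0 :=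
      List.count_eq_zero_of_not_mem hmem
    have hnot : ¬ t ∈ PySem.List.pyGetD dt (k : Int) [] := by
      intro hin
      apply hmem
      apply List.mem_filter.mpr
      refine ⟨PySem.List.mem_pyRange_one.mpr ⟨by positivity, ?_⟩, by simp only [decide_eq_true_eq]; exact hin⟩
      by_contra hge
      push_neg at hge
      have hz : PySem.List.pyGetD dt (k : Int) [] = [] := by
        rw [PySem.List.pyGetD_natCast]
        apply List.getD_eq_default
        simp [PySem.List.len] at hge ⊢
        omega
      rw [hz] at hin
      exact (List.not_mem_nil) hin
    rw [h0, if_neg hnot]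

lemma postings_mem_bound (dt : List (List String)) (t : String) :
    ∀ i ∈ pvPostings dt t, 0 ≤ i ∧ i < (dt.length : Int) := by
  intro i hi
  have := (List.mem_filter.mp hi).1
  have h := PySem.List.mem_pyRange_one.mp this
  simpa [PySem.List.len] using h

lemma bump_spec (I : List Int) :
    ∀ (sc : List Int), (∀ i ∈ I, 0 ≤ i ∧ i < (sc.length : Int)) →
      (I.foldl (fun sc i => PySem.List.pySetD sc i (PySem.List.pyGetD sc i 0 + 1)) sc).length = sc.length
      ∧ ∀ k : Nat,
        (I.foldl (fun sc i => PySem.List.pySetD sc i (PySem.List.pyGetD sc i 0 + 1)) sc).getD k 0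
          = sc.getD k 0 + List.count (k : Int) I := by
  induction I with
  | nil => intro sc _; simp
  | cons i I ih =>
      intro sc hb
      obtain ⟨hi0, hilt⟩ := hb i (by simp)
      have hset : PySem.List.pySetD sc i (PySem.List.pyGetD sc i 0 + 1)
          = sc.set i.toNat (sc.getD i.toNat 0 + 1) := by
        rw [PySem.List.pySetD_of_nonneg sc _ hi0, PySem.List.pyGetD_of_nonneg sc 0 hi0]
      have hlen : (sc.set i.toNat (sc.getD i.toNat 0 + 1)).length = sc.length := by simp
      have hb' : ∀ j ∈ I, 0 ≤ j ∧ j < ((sc.set i.toNat (sc.getD i.toNat 0 + 1)).length : Int) := by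
        intro j hj; rw [hlen]; exact hb j (List.mem_cons_of_mem _ hj)
      obtain ⟨ihlen, ihget⟩ := ih (sc.set i.toNat (sc.getD i.toNat 0 + 1)) hb'
      constructor
      · simp only [List.foldl_cons, hset, ihlen, hlen]
      · intro k
        simp only [List.foldl_cons, hset, ihget]
        have hcnt : List.count (k : Int) (i :: I)
            = List.count (k : Int) I + (if i = (k : Int) then 1 else 0) := by
          simp [List.count_cons]
        rw [hcnt]
        have hidx : i.toNat < sc.length := by omega
        by_cases hik : i = (k : Int)
        · have hkn : i.toNat = k := by omega
          have : (sc.set i.toNat (sc.getD i.toNat 0 + 1)).getD k 0 = sc.getD k 0 + 1 := by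
            subst hkn
            rw [List.getD_eq_getElem?_getD, List.getElem?_set_self (by omega)]
            rw [List.getD_eq_getElem?_getD, List.getElem?_eq_getElem hidx]
            simp [List.getElem?_eq_getElem hidx, List.getD_eq_getElem?_getD]
          rw [this]; simp [hik]; ring
        · have hkn : i.toNat ≠ k := by omega
          have : (sc.set i.toNat (sc.getD i.toNat 0 + 1)).getD k 0 = sc.getD k 0 := by
            rw [List.getD_eq_getElem?_getD, List.getElem?_set_ne hkn, ← List.getD_eq_getElem?_getD]
          rw [this]; simp [hik]

lemma scores_spec (dt : List (List String)) (L : List String) :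
    ∀ (sc : List Int), sc.length = dt.length →
      (L.foldl (fun sc t => (pvPostings dt t).foldl
          (fun sc i => PySem.List.pySetD sc i (PySem.List.pyGetD sc i 0 + 1)) sc) sc).length = sc.length
      ∧ ∀ k : Nat,
        (L.foldl (fun sc t => (pvPostings dt t).foldl
            (fun sc i => PySem.List.pySetD sc i (PySem.List.pyGetD sc i 0 + 1)) sc) sc).getD k 0
          = sc.getD k 0 + L.countP (fun t => decide (t ∈ PySem.List.pyGetD dt (k : Int) [])) := by
  induction L with
  | nil => intro sc _; simp
  | cons t L ih =>
      intro sc hlen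
      have hb : ∀ i ∈ pvPostings dt t, 0 ≤ i ∧ i < (sc.length : Int) := by
        intro i hi; rw [hlen]; exact postings_mem_bound dt t i hi
      obtain ⟨blen, bget⟩ := bump_spec (pvPostings dt t) sc hb
      obtain ⟨ilen, iget⟩ := ih _ (by rw [blen, hlen])
      constructor
      · simp only [List.foldl_cons, ilen, blen]
      · intro k
        simp only [List.foldl_cons, iget, bget, count_postings dt t k, List.countP_cons]
        by_cases h : t ∈ PySem.List.pyGetD dt (k : Int) [] <;> simp [h] <;> ring

lemma score_eq_countP (q toks : List String) :
    pvScore q toks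
      = ((PySem.Set.ofList q).countP (fun t => decide (t ∈ toks)) : Int) := by
  unfold pvScore
  simp only [PySem.Set.len, PySem.Set.inter, List.countP_eq_length_filter]
  have hfun : (List.filter (fun x => PySem.Set.contains toks x) (PySem.Set.ofList q))
      = List.filter (fun t => decide (t ∈ toks)) (PySem.Set.ofList q) := by
    apply List.filter_congr
    intro x _
    simp [PySem.Set.contains]
  rw [hfun]

lemma pyGetD_replicate_zero (n : Nat) (k : Nat) :
    (List.replicate n (0 : Int)).getD k 0 = 0 := by
  by_cases h : k < n
  · rw [List.getD_eq_getElem?_getD, List.getElem?_eq_getElem (by simpa using h)]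
    simp
  · rw [List.getD_eq_default]
    simpa using Nat.le_of_not_lt h

-- the final scores list B computes IS the map of A's per-document score
lemma scores_eq_map (q : List String) (dt : List (List String)) :
    ((PySem.Set.ofList q).foldl
      (fun sc t => (pvPostings dt t).foldl
        (fun sc i => PySem.List.pySetD sc i (PySem.List.pyGetD sc i 0 + 1)) sc)
      (List.replicate dt.length 0))
    = dt.map (fun toks => pvScore q toks) := by
  obtain ⟨hlen, hget⟩ := scores_spec dt (PySem.Set.ofList q)
      (List.replicate dt.length 0) (by simp)
  apply List.ext_getElem
  · simpa using hlen
  · intro k hk1 hk2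
    have h1 := hget k
    rw [pyGetD_replicate_zero, zero_add] at h1
    have hkd : k < dt.length := by simpa using hk2
    have hL : PySem.List.pyGetD dt (k : Int) [] = dt[k] := by
      rw [PySem.List.pyGetD_natCast, List.getD_eq_getElem _ _ hkd]
    rw [hL] at h1
    rw [List.getElem_map, ← List.getD_eq_getElem _ (0 : Int) hk1, h1, score_eq_countP]

lemma pyGetD_scoremap (q : List String) (dt : List (List String)) (j : Int) :
    PySem.List.pyGetD (dt.map (fun toks => pvScore q toks)) j 0
      = pvScore q (PySem.List.pyGetD dt j []) := by
  have h0 : pvScore q [] = 0 := by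
    unfold pvScore
    simp [PySem.Set.inter, PySem.Set.len, PySem.Set.contains]
  rw [← h0, PySem.List.pyGetD_map]

-- ===== VERDICT (by name: the statement is the Claim_ definition above) =====
theorem lexical_rank_fallback_py_spec : Claim_equal_lexical_rank_fallback_py := by
  intro q dt _
  unfold Spec_lexical_rank_fallback_py
  simp only [lexical_rank_fallback_py, lexical_rank_fallback_py_alt]
  rw [foldl_append_map, List.nil_append]
  have hidx : ∀ t : String,
      PySem.Dict.getD ((PySem.List.enumerate dt).foldl
        (fun d p => (PySem.Set.ofList p.2).foldl
          (fun d u => PySem.Dict.insert d u (PySem.Dict.getD d u [] ++ [p.1])) d)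
        PySem.Dict.empty) t [] = pvPostings dt t := by
    intro t
    rw [getD_buildIndex]
    have hemp : PySem.Dict.getD (PySem.Dict.empty : PySem.Dict String (List Int)) t [] = [] := rfl
    rw [hemp, List.nil_append, PySem.List.enumerate_eq_map_pyRange dt [], List.flatMap_map]
    unfold pvPostings
    rw [← flatMap_ite_filter]
  simp only [hidx]
  rw [scores_eq_map q dt]
  rw [PySem.List.sorted_rev_eq_foldl_insertBy, PySem.List.sorted_eq_foldl_insertBy]
  rw [PySem.List.enumerate_eq_map_pyRange dt [], List.map_map]
  have h : ∀ a b : Int,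
      (fun (x y : Int × Int) => decide (y.1 < x.1))
        (((fun p : Int × List String => (PySem.Set.len (PySem.Set.inter (PySem.Set.ofList q) p.2), p.1)) ∘
          (fun j : Int => (j, PySem.List.pyGetD dt j []))) a)
        (((fun p : Int × List String => (PySem.Set.len (PySem.Set.inter (PySem.Set.ofList q) p.2), p.1)) ∘
          (fun j : Int => (j, PySem.List.pyGetD dt j []))) b)
      = (fun a b : Int =>
          decide (-(PySem.List.pyGetD (dt.map fun toks => pvScore q toks) a 0)
            < -(PySem.List.pyGetD (dt.map fun toks => pvScore q toks) b 0))) a b := by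
    intro a b
    simp only [Function.comp]
    rw [pyGetD_scoremap, pyGetD_scoremap, decide_eq_decide]
    simp only [pvScore]
    omega
  rw [show ([] : List (Int × Int)) = List.map
      ((fun p : Int × List String => (PySem.Set.len (PySem.Set.inter (PySem.Set.ofList q) p.2), p.1)) ∘
        (fun j : Int => (j, PySem.List.pyGetD dt j []))) [] from rfl]
  rw [← foldl_insertBy_map _ _ _ h]
  rw [List.map_map]
  have hid : ((fun p : Int × Int => p.2) ∘
      ((fun p : Int × List String => (PySem.Set.len (PySem.Set.inter (PySem.Set.ofList q) p.2), p.1)) ∘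
        (fun j : Int => (j, PySem.List.pyGetD dt j [])))) = id := rfl
  rw [hid, List.map_id]
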